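-- pv_equiv track=rewrite | github.com/olga-ivanko/WEB_HW2 | terminal_tips.py | func_completer
-- ===== SOURCE A (Python) =====
-- def func_completer(COMMANDS: dict):
--     comp_dict = {}
--     sorted_comand = sorted(COMMANDS.keys())
--     for key in sorted_comand[1:]:
--         words = key.split()
--         first_word = words[0]
--         rest_of_key = ' '.join(words[1:]) if len(words) > 1 else None
--         if first_word not in comp_dict:
--             comp_dict[first_word] = {rest_of_key} if rest_of_key else None
--         else:
--             if rest_of_key:
--                 if comp_dict[first_word] is None:
--                     comp_dict[first_word] = {rest_of_key}
--                 else: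
--                     comp_dict[first_word].add(rest_of_key)
--             else:
--                 comp_dict[first_word] = None
--     return comp_dict
-- ===== SOURCE B (Python) =====
-- def func_completer(COMMANDS: dict):
--     keys = sorted(COMMANDS.keys())[1:]
--     # phase 1: group the rest-parts by first word, in first-appearance order
--     groups = {}
--     for key in keys:
--         words = key.split()
--         rest = ' '.join(words[1:]) if len(words) > 1 else None
--         groups.setdefault(words[0], []).append(rest)
--     # phase 2: per group, keep only the rests after the last bare command
--     result = {}
--     for fw, rests in groups.items():
--         tail = []
--         for r in reversed(rests):
--             if r is None:
--                 break
--             tail.append(r)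
--         tail.reverse()
--         result[fw] = set(tail) if tail else None
--     return result
-- ===== Notes on version B (the rewrite author's own statement) =====
-- stated objective: alternative
-- what changed: Replaces A's single fold with conditional dict-update cases by a two-phase decomposition: first group the rest-parts by first word in encounter order, then compute each value independently by a backward scan that cuts at the last bare command.
import Mathlib
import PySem

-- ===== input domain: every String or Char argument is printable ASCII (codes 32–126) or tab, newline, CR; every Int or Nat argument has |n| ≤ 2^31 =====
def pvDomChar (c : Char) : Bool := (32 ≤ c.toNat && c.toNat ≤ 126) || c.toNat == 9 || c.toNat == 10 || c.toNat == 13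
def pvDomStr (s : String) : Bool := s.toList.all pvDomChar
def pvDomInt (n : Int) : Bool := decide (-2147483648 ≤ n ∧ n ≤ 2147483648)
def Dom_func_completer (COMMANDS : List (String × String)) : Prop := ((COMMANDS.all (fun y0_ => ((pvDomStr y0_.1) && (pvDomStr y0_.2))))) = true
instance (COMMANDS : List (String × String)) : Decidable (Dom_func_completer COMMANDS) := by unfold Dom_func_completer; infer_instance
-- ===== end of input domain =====

-- B is an alternative decomposition (group by first word, then cut each group at its last bare
-- command) of the same completion-dict computation; equivalence of return values is proved.

-- ===== PORT A =====
-- literal port of A's single loop over sorted(COMMANDS.keys())[1:] with conditional dict updates.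
-- words[0] raises IndexError in Python when key.split() == []; Pre_ excludes that, '.getD ""' is
-- the total stand-in outside Pre_.  'if rest_of_key:' is ported as an is-None test: rest_of_key is
-- None or ' '.join of nonempty words, never the empty string.
def func_completer (COMMANDS : List (String × String)) : List (String × Option (List String)) :=
  let sorted_comand := PySem.List.sorted (PySem.Dict.keys (PySem.Dict.ofList COMMANDS)) (fun x => x) false
  let comp_dict := (PySem.List.slice sorted_comand (some 1) none).foldl
    (fun comp_dict key =>
      let words := PySem.Str.split₀ key
      let first_word := (PySem.List.pyGet? words 0).getD ""
      let rest_of_key : Option String :=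
        if words.length > 1 then some (PySem.Str.join " " (PySem.List.slice words (some 1) none)) else none
      if comp_dict.contains first_word = false then
        comp_dict.insert first_word (match rest_of_key with
          | some r => some [r]
          | none => none)
      else
        match rest_of_key with
        | some r =>
          (match comp_dict.get? first_word with
           | some none => comp_dict.insert first_word (some [r])
           | some (some s) => comp_dict.insert first_word (some (PySem.Set.add s r))
           | none => comp_dict.insert first_word (some [r]))  -- unreachable: contains = true
        | none => comp_dict.insert first_word none)
    PySem.Dict.empty
  comp_dict.items

-- ===== PORT B =====
-- port of Source B's inner backward loop with break: collect rests from the end until a bare command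
def pvCollectTail : List (Option String) → List String
  | [] => []
  | none :: _ => []
  | some r :: rs => r :: pvCollectTail rs

def func_completer_alt (COMMANDS : List (String × String)) : List (String × Option (List String)) :=
  let keys := PySem.List.slice
    (PySem.List.sorted (PySem.Dict.keys (PySem.Dict.ofList COMMANDS)) (fun x => x) false) (some 1) none
  -- phase 1: groups.setdefault(words[0], []).append(rest)
  let groups := keys.foldl
    (fun g key =>
      let words := PySem.Str.split₀ key
      let rest : Option String :=
        if words.length > 1 then some (PySem.Str.join " " (PySem.List.slice words (some 1) none)) else none
      g.modify ((PySem.List.pyGet? words 0).getD "") [] (· ++ [rest]))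
    PySem.Dict.empty
  -- phase 2: per group, backward scan, cut at the last bare command
  let result := groups.items.foldl
    (fun res p =>
      let tail := (pvCollectTail p.2.reverse).reverse
      res.insert p.1 (if tail.isEmpty then none else some (PySem.Set.ofList tail)))
    PySem.Dict.empty
  result.items

-- ===== PRECONDITION & SPEC =====
-- Pre_ excludes exactly the inputs where Python A raises IndexError: a whitespace-only/empty key
-- that is not the strictly smallest key lands in sorted(keys)[1:], where words[0] fails
-- (both A and B raise there).  'k < k' for all other keys' ↔ 'k is sorted(keys)[0]'.
def Pre_func_completer (COMMANDS : List (String × String)) : Prop :=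
  ∀ k ∈ PySem.Dict.keys (PySem.Dict.ofList COMMANDS), PySem.Str.split₀ k = [] →
    ∀ k' ∈ PySem.Dict.keys (PySem.Dict.ofList COMMANDS), k' ≠ k → k < k'
instance (COMMANDS : List (String × String)) : Decidable (Pre_func_completer COMMANDS) := by
  unfold Pre_func_completer; infer_instance
def pvWitness_func_completer : (List (String × String)) :=
  [("add contact", "a"), ("add", "b"), ("show all", "c")]
def Spec_func_completer (COMMANDS : List (String × String)) (out : List (String × Option (List String))) : Prop := out = func_completer_alt COMMANDS
instance (COMMANDS : List (String × String)) (out : List (String × Option (List String))) : Decidable (Spec_func_completer COMMANDS out) := by unfold Spec_func_completer; infer_instance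

-- ===== CLAIM (what is proved, stated in full; the proofs are below) =====
def Claim_equal_func_completer : Prop := ∀ (COMMANDS : List (String × String)), Dom_func_completer COMMANDS → Pre_func_completer COMMANDS → Spec_func_completer COMMANDS (func_completer COMMANDS)

-- ===== LEMMAS AND PROOFS =====

-- helper abbreviations used only by the proofs
def pvFw (k : String) : String := (PySem.List.pyGet? (PySem.Str.split₀ k) 0).getD ""
def pvRest (k : String) : Option String :=
  if (PySem.Str.split₀ k).length > 1
  then some (PySem.Str.join " " (PySem.List.slice (PySem.Str.split₀ k) (some 1) none)) else none
def pvNext (v : Option (Option (List String))) (r : Option String) : Option (List String) :=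
  match v, r with
  | none, r => r.map (fun x => [x])
  | some _, none => none
  | some none, some r => some [r]
  | some (some s), some r => some (PySem.Set.add s r)
def pvVal (rs : List (Option String)) : Option (List String) :=
  let tail := (pvCollectTail rs.reverse).reverse
  if tail.isEmpty then none else some (PySem.Set.ofList tail)
def pvRests (c : String) (l : List String) : List (Option String) :=
  (l.filter (fun k => pvFw k == c)).map pvRest

theorem pvStepA_eq :
    (fun (comp_dict : PySem.Dict String (Option (List String))) (key : String) =>
      let words := PySem.Str.split₀ key
      let first_word := (PySem.List.pyGet? words 0).getD ""
      let rest_of_key : Option String :=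
        if words.length > 1 then some (PySem.Str.join " " (PySem.List.slice words (some 1) none)) else none
      if comp_dict.contains first_word = false then
        comp_dict.insert first_word (match rest_of_key with
          | some r => some [r]
          | none => none)
      else
        match rest_of_key with
        | some r =>
          (match comp_dict.get? first_word with
           | some none => comp_dict.insert first_word (some [r])
           | some (some s) => comp_dict.insert first_word (some (PySem.Set.add s r))
           | none => comp_dict.insert first_word (some [r]))
        | none => comp_dict.insert first_word none) =
    (fun d key => d.insert (pvFw key) (pvNext (d.get? (pvFw key)) (pvRest key))) := by
  funext d key
  simp only [pvFw, pvRest]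
  cases h : d.get? ((PySem.List.pyGet? (PySem.Str.split₀ key) 0).getD "") with
  | none =>
    by_cases hw : (PySem.Str.split₀ key).length > 1 <;>
      simp [hw, h, PySem.Dict.contains_eq_isSome_get?, pvNext]
  | some v =>
    cases v with
    | none =>
      by_cases hw : (PySem.Str.split₀ key).length > 1 <;>
        simp [hw, h, PySem.Dict.contains_eq_isSome_get?, pvNext]
    | some s =>
      by_cases hw : (PySem.Str.split₀ key).length > 1 <;>
        simp [hw, h, PySem.Dict.contains_eq_isSome_get?, pvNext]

theorem pvAfold_get? (l : List String) (d : PySem.Dict String (Option (List String))) (c : String) :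
    (l.foldl (fun d key => d.insert (pvFw key) (pvNext (d.get? (pvFw key)) (pvRest key))) d).get? c =
      (pvRests c l).foldl (fun v r => some (pvNext v r)) (d.get? c) := by
  induction l generalizing d with
  | nil => rfl
  | cons k l ih =>
    simp only [List.foldl_cons, ih, pvRests, List.filter_cons]
    by_cases hc : pvFw k = c
    · simp [hc]
    · have : (pvFw k == c) = false := by simp [hc]
      simp [this, PySem.Dict.get?_insert, Ne.symm hc]

theorem pvSet_ofList_append (l : List String) (r : String) :
    PySem.Set.ofList (l ++ [r]) = PySem.Set.add (PySem.Set.ofList l) r := by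
  simp [PySem.Set.ofList_eq_foldl, List.foldl_append]

theorem pvChain_none (rs : List (Option String)) :
    (rs.foldl (fun v r => some (pvNext v r)) none) =
      (if rs.isEmpty then none else some (pvVal rs)) := by
  induction rs using List.reverseRecOn with
  | nil => rfl
  | append_singleton rs o ih =>
    rw [List.foldl_append]
    cases rs with
    | nil =>
      cases o <;> simp [pvNext, pvVal, pvCollectTail, PySem.Set.ofList_eq_foldl,
        PySem.Set.add, PySem.Set.contains]
    | cons r0 rs0 =>
      simp only [List.isEmpty_cons, if_neg Bool.false_ne_true] at ih
      rw [ih]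
      simp only [List.foldl_cons, List.foldl_nil]
      have htail : ∀ (o : Option String),
          ((pvCollectTail (((r0 :: rs0) ++ [o]).reverse)).reverse) =
            match o with
            | none => []
            | some r => (pvCollectTail ((r0 :: rs0).reverse)).reverse ++ [r] := by
        intro o
        cases o <;> simp [pvCollectTail]
      cases o with
      | none =>
        simp only [pvVal, htail]
        simp [pvNext]
      | some r =>
        simp only [pvVal, htail]
        by_cases hte : pvCollectTail ((r0 :: rs0).reverse) = []
        · simp only [List.reverse_cons] at hte
          simp [hte, pvNext, PySem.Set.ofList_eq_foldl, PySem.Set.add, PySem.Set.contains]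
        · simp only [List.reverse_cons] at hte
          simp [hte, pvNext, pvSet_ofList_append]

theorem pvStepB_eq :
    (fun (g : PySem.Dict String (List (Option String))) (key : String) =>
      let words := PySem.Str.split₀ key
      let rest : Option String :=
        if words.length > 1 then some (PySem.Str.join " " (PySem.List.slice words (some 1) none)) else none
      g.modify ((PySem.List.pyGet? words 0).getD "") [] (· ++ [rest])) =
    (fun (g : PySem.Dict String (List (Option String))) (key : String) =>
      g.modify (pvFw key) [] (· ++ [pvRest key])) := rfl

theorem pvStepR_eq :
    (fun (res : PySem.Dict String (Option (List String))) (p : String × List (Option String)) =>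
      let tail := (pvCollectTail p.2.reverse).reverse
      res.insert p.1 (if tail.isEmpty then none else some (PySem.Set.ofList tail))) =
    (fun (res : PySem.Dict String (Option (List String))) (p : String × List (Option String)) =>
      res.insert p.1 (pvVal p.2)) := rfl

theorem pvAfold_keys (l : List String) :
    (l.foldl (fun d key => d.insert (pvFw key) (pvNext (d.get? (pvFw key)) (pvRest key)))
      (PySem.Dict.empty : PySem.Dict String (Option (List String)))).keys
      = PySem.Set.ofList (l.map pvFw) := by
  rw [PySem.Dict.keys_foldl_insert_key]
  simp [PySem.Dict.keys_empty, PySem.Set.update_nil_left]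

theorem pvAfold_nodup (l : List String) :
    (l.foldl (fun d key => d.insert (pvFw key) (pvNext (d.get? (pvFw key)) (pvRest key)))
      (PySem.Dict.empty : PySem.Dict String (Option (List String)))).keys.Nodup := by
  exact PySem.Dict.nodup_keys_foldl_insert_key _ _ _ _ PySem.Dict.nodup_keys_empty

theorem pvGroups_getD (l : List String) (d : PySem.Dict String (List (Option String))) (c : String) :
    (l.foldl (fun g key => g.modify (pvFw key) [] (· ++ [pvRest key])) d).getD c []
      = d.getD c [] ++ pvRests c l := by
  induction l generalizing d with
  | nil => simp [pvRests]
  | cons k l ih =>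
    simp only [List.foldl_cons, ih, pvRests, List.filter_cons]
    by_cases hc : pvFw k = c
    · simp [hc]
    · have hb : (pvFw k == c) = false := by simp [hc]
      simp [hb, PySem.Dict.getD_modify, Ne.symm hc]

theorem pvGroups_keys (l : List String) :
    (l.foldl (fun g key => g.modify (pvFw key) [] (· ++ [pvRest key]))
      (PySem.Dict.empty : PySem.Dict String (List (Option String)))).keys
      = PySem.Set.ofList (l.map pvFw) := by
  rw [PySem.Dict.keys_foldl_modify_key]
  simp [PySem.Dict.keys_empty, PySem.Set.update_nil_left]

theorem pvGroups_nodup (l : List String) :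
    (l.foldl (fun g key => g.modify (pvFw key) [] (· ++ [pvRest key]))
      (PySem.Dict.empty : PySem.Dict String (List (Option String)))).keys.Nodup := by
  exact PySem.Dict.nodup_keys_foldl_modify_key _ _ _ _ _ PySem.Dict.nodup_keys_empty

theorem pvRests_ne_nil {c : String} {l : List String} (h : c ∈ l.map pvFw) :
    pvRests c l ≠ [] := by
  simp only [List.mem_map] at h
  obtain ⟨k, hk, hfk⟩ := h
  simp only [pvRests, ne_eq, List.map_eq_nil_iff, List.filter_eq_nil_iff]
  intro hall
  exact absurd hfk (by simpa using hall k hk)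

theorem pvA_getD (l : List String) (c : String) (h : c ∈ l.map pvFw) :
    (l.foldl (fun d key => d.insert (pvFw key) (pvNext (d.get? (pvFw key)) (pvRest key)))
      (PySem.Dict.empty : PySem.Dict String (Option (List String)))).getD c none
      = pvVal (pvRests c l) := by
  rw [PySem.Dict.getD_eq_get?_getD, pvAfold_get? l PySem.Dict.empty c,
    PySem.Dict.get?_empty, pvChain_none]
  have hne := pvRests_ne_nil h
  simp [hne]

theorem pvB_items (l : List String) :
    (List.foldl (fun res p => res.insert p.1 (pvVal p.2))
        (PySem.Dict.empty : PySem.Dict String (Option (List String)))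
        (List.foldl (fun g key => g.modify (pvFw key) [] fun x => x ++ [pvRest key])
          (PySem.Dict.empty : PySem.Dict String (List (Option String))) l).items).items
      = (PySem.Set.ofList (l.map pvFw)).map (fun c => (c, pvVal (pvRests c l))) := by
  have hnd := pvGroups_nodup l
  have hitems : (List.foldl (fun g key => g.modify (pvFw key) [] fun x => x ++ [pvRest key])
      (PySem.Dict.empty : PySem.Dict String (List (Option String))) l).items
      = (PySem.Set.ofList (l.map pvFw)).map (fun c => (c, pvRests c l)) := by
    rw [PySem.Dict.items_eq_map_keys _ hnd [], pvGroups_keys]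
    refine List.map_congr_left (fun c _ => ?_)
    rw [pvGroups_getD l PySem.Dict.empty c, PySem.Dict.getD_empty]
    rfl
  have hfst : ((List.foldl (fun g key => g.modify (pvFw key) [] fun x => x ++ [pvRest key])
      (PySem.Dict.empty : PySem.Dict String (List (Option String))) l).items.map Prod.fst).Nodup := by
    simpa [PySem.Dict.keys] using hnd
  have hfresh := PySem.Dict.items_foldl_insert_fresh
    (List.foldl (fun g key => g.modify (pvFw key) [] fun x => x ++ [pvRest key])
      (PySem.Dict.empty : PySem.Dict String (List (Option String))) l).items
    Prod.fst (fun p => pvVal p.2)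
    (PySem.Dict.empty : PySem.Dict String (Option (List String)))
    (fun a _ => PySem.Dict.contains_empty _) hfst
  beta_reduce at hfresh
  have hempty : (PySem.Dict.empty : PySem.Dict String (Option (List String))).items = [] := rfl
  rw [hfresh, hitems, hempty, List.nil_append, List.map_map]
  rfl

theorem func_completer_spec : Claim_equal_func_completer := by
  unfold Claim_equal_func_completer
  intro COMMANDS _ _
  unfold Spec_func_completer func_completer func_completer_alt
  simp only [pvStepA_eq, pvStepB_eq, pvStepR_eq]
  set ks := PySem.List.slice
    (PySem.List.sorted (PySem.Dict.keys (PySem.Dict.ofList COMMANDS)) (fun x => x) false)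
    (some 1) none with hks
  rw [PySem.Dict.items_eq_map_keys _ (pvAfold_nodup ks) none, pvAfold_keys, pvB_items]
  refine List.map_congr_left (fun c hc => ?_)
  rw [pvA_getD ks c ((PySem.Set.mem_ofList _ _).mp hc)]
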